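-- pv_equiv track=rewrite | github.com/zrnge/Mosqito | mosqito.py | generate_variants
-- ===== SOURCE A (Python) =====
-- import itertools
-- from typing import Dict, List
--
-- HOMOGLYPHS: Dict[str, List[str]] = {
--     "a": ["а", "ɑ", "α", "à", "á", "â", "ä", "ã", "å"],
--     "b": ["Ь", "ʙ"],
--     "c": ["с", "ϲ", "ç"],
--     "d": ["ԁ", "ɗ"],
--     "e": ["е", "ε", "ē", "ė", "ë", "ê", "é"],
--     "g": ["ɡ", "ɢ"],
--     "h": ["һ", "ḥ"],
--     "i": ["і", "ı", "ɩ", "í", "ï"],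
--     "j": ["ј"],
--     "k": ["κ", "к"],
--     "l": ["ⅼ", "ӏ", "1", "|"],
--     "m": ["ｍ", "ṃ"],
--     "n": ["ո", "ń"],
--     "o": ["ο", "о", "օ", "0", "ö", "ó", "ò", "ô"],
--     "p": ["р", "ρ"],
--     "q": ["ԛ"],
--     "r": ["г", "ṛ"],
--     "s": ["ѕ", "ʂ"],
--     "t": ["τ", "т"],
--     "u": ["υ", "ս", "ü", "ú"],
--     "v": ["ѵ", "ν"],
--     "w": ["ѡ"],
--     "x": ["х", "χ"],
--     "y": ["у", "γ"],
--     "z": ["ᴢ", "ż"],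
-- }
--
-- def generate_variants(label: str, max_changes: int):
--     positions = [
--         (i, HOMOGLYPHS[c])
--         for i, c in enumerate(label)
--         if c in HOMOGLYPHS
--     ]
--
--     variants = set()
--
--     for r in range(1, max_changes + 1):
--         for combo in itertools.combinations(positions, r):
--             indexes, replacements = zip(*combo)
--             for product in itertools.product(*replacements):
--                 chars = list(label)
--                 for idx, rep in zip(indexes, product):
--                     chars[idx] = rep
--                 variants.add("".join(chars))
--
--     return variants
-- ===== SOURCE B (Python) =====
-- from typing import Dict, List
--
-- HOMOGLYPHS: Dict[str, List[str]] = {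
--     "a": ["а", "ɑ", "α", "à", "á", "â", "ä", "ã", "å"],
--     "b": ["Ь", "ʙ"],
--     "c": ["с", "ϲ", "ç"],
--     "d": ["ԁ", "ɗ"],
--     "e": ["е", "ε", "ē", "ė", "ë", "ê", "é"],
--     "g": ["ɡ", "ɢ"],
--     "h": ["һ", "ḥ"],
--     "i": ["і", "ı", "ɩ", "í", "ï"],
--     "j": ["ј"],
--     "k": ["κ", "к"],
--     "l": ["ⅼ", "ӏ", "1", "|"],
--     "m": ["ｍ", "ṃ"],
--     "n": ["ո", "ń"],
--     "o": ["ο", "о", "օ", "0", "ö", "ó", "ò", "ô"],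
--     "p": ["р", "ρ"],
--     "q": ["ԛ"],
--     "r": ["г", "ṛ"],
--     "s": ["ѕ", "ʂ"],
--     "t": ["τ", "т"],
--     "u": ["υ", "ս", "ü", "ú"],
--     "v": ["ѵ", "ν"],
--     "w": ["ѡ"],
--     "x": ["х", "χ"],
--     "y": ["у", "γ"],
--     "z": ["ᴢ", "ż"],
-- }
--
--
-- def generate_variants(label: str, max_changes: int):
--     # One recursion over the string suffix, carrying the remaining-changes
--     # budget r: groups(s, r) is the list of variants of s with exactly r
--     # substitutions, grouped into blocks (one block per choice of substituted
--     # positions) — no positions list, no itertools, no index bookkeeping.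
--     def groups(s: str, r: int) -> list:
--         if r == 0:
--             return [[s]]
--         if not s:
--             return []
--         c, rest = s[0], s[1:]
--         res = []
--         if c in HOMOGLYPHS:
--             res += [[rep + t for rep in HOMOGLYPHS[c] for t in blk]
--                     for blk in groups(rest, r - 1)]
--         res += [[c + t for t in blk] for blk in groups(rest, r)]
--         return res
--
--     budget = min(max_changes, sum(c in HOMOGLYPHS for c in label))
--     variants = set()
--     for r in range(1, budget + 1):
--         for blk in groups(label, r):
--             variants.update(blk)
--     return variants
-- ===== Notes on version B (the rewrite author's own statement) =====
-- stated objective: alternative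
-- what changed: Replaces the r-loop over itertools.combinations of a positions list, zip(*), itertools.product and in-place index mutation of a char list by a single recursion over the string suffix that carries the remaining-changes budget and builds the variant strings directly, with the budget capped at the number of substitutable characters.
import Mathlib
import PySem

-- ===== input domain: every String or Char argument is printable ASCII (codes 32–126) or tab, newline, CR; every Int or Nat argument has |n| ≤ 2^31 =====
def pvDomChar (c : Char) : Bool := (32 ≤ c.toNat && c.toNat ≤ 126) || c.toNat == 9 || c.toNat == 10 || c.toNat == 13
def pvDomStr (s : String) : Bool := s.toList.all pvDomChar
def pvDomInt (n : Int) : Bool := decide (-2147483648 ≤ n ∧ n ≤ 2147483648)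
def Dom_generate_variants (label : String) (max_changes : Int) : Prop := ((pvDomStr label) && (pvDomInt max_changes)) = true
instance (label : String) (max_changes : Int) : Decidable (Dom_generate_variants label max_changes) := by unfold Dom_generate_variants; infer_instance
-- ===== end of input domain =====

-- B replaces A's r-loop + itertools.combinations/product + index mutation by a single
-- recursion over the string suffix carrying a remaining-changes budget (alternative decomposition).


-- ===== PORT A =====
-- the module constant HOMOGLYPHS (keys and replacements are single characters)
def pvHG : PySem.Dict Char (List Char) :=
  PySem.Dict.mk
  [('a', ['а', 'ɑ', 'α', 'à', 'á', 'â', 'ä', 'ã', 'å']),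
   ('b', ['Ь', 'ʙ']),
   ('c', ['с', 'ϲ', 'ç']),
   ('d', ['ԁ', 'ɗ']),
   ('e', ['е', 'ε', 'ē', 'ė', 'ë', 'ê', 'é']),
   ('g', ['ɡ', 'ɢ']),
   ('h', ['һ', 'ḥ']),
   ('i', ['і', 'ı', 'ɩ', 'í', 'ï']),
   ('j', ['ј']),
   ('k', ['κ', 'к']),
   ('l', ['ⅼ', 'ӏ', '1', '|']),
   ('m', ['ｍ', 'ṃ']),
   ('n', ['ո', 'ń']),
   ('o', ['ο', 'о', 'օ', '0', 'ö', 'ó', 'ò', 'ô']),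
   ('p', ['р', 'ρ']),
   ('q', ['ԛ']),
   ('r', ['г', 'ṛ']),
   ('s', ['ѕ', 'ʂ']),
   ('t', ['τ', 'т']),
   ('u', ['υ', 'ս', 'ü', 'ú']),
   ('v', ['ѵ', 'ν']),
   ('w', ['ѡ']),
   ('x', ['х', 'χ']),
   ('y', ['у', 'γ']),
   ('z', ['ᴢ', 'ż'])]

-- itertools.product(*lists): exact CPython order (first list varies slowest)
def pvProduct {α : Type} : List (List α) → List (List α)
  | [] => [[]]
  | l :: ls => l.flatMap (fun x => (pvProduct ls).map (x :: ·))

-- A, step for step: positions comprehension, r-loop, combinations, zip(*), product,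
-- chars mutation (indices come from enumerate, so 0 ≤ idx < len and .set idx.toNat is
-- Python's chars[idx] = rep exactly), "".join, set accumulation.
def generate_variants (label : String) (max_changes : Int) : List String :=
  let positions : List (Int × List Char) :=
    (PySem.List.enumerate label.toList 0).filterMap
      (fun ic => (pvHG.get? ic.2).map (fun reps => (ic.1, reps)))
  (PySem.List.pyRange 1 (max_changes + 1) 1).foldl (fun variants r =>
      (PySem.List.combinations positions r.toNat).foldl (fun variants combo =>
          (pvProduct (combo.map Prod.snd)).foldl (fun variants product =>
              PySem.Set.add variants (String.ofList
                (((combo.map Prod.fst).zip product).foldl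
                  (fun chars p => chars.set p.1.toNat p.2) label.toList)))
            variants)
        variants)
    PySem.Set.empty

-- ===== PORT B =====
-- B's recursion: groups s r = variants of s with exactly r substitutions,
-- in blocks (one block per choice of substituted positions)
def pvGroups (s : List Char) (r : Nat) : List (List (List Char)) :=
  match r, s with
  | 0, s => [[s]]
  | _ + 1, [] => []
  | r + 1, c :: rest =>
    (match pvHG.get? c with
     | some reps =>
        (pvGroups rest r).map (fun blk => reps.flatMap (fun rep => blk.map (rep :: ·)))
     | none => [])
    ++ (pvGroups rest (r + 1)).map (fun blk => blk.map (c :: ·))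

def generate_variants_alt (label : String) (max_changes : Int) : List String :=
  let budget : Int :=
    min max_changes ((label.toList.countP (fun c => (pvHG.get? c).isSome) : Int))
  (PySem.List.pyRange 1 (budget + 1) 1).foldl (fun variants r =>
      (pvGroups label.toList r.toNat).foldl
        (fun variants blk => PySem.Set.update variants (blk.map String.ofList)) variants)
    PySem.Set.empty

-- ===== PRECONDITION & SPEC =====
def Spec_generate_variants (label : String) (max_changes : Int) (out : List String) : Prop := out = generate_variants_alt label max_changes
instance (label : String) (max_changes : Int) (out : List String) : Decidable (Spec_generate_variants label max_changes out) := by unfold Spec_generate_variants; infer_instance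

-- ===== CLAIM (what is proved, stated in full; the proofs are below) =====
def Claim_equal_generate_variants : Prop := ∀ (label : String) (max_changes : Int), Dom_generate_variants label max_changes → Spec_generate_variants label max_changes (generate_variants label max_changes)

-- ===== LEMMAS AND PROOFS =====

-- A's positions list for the suffix s of the label starting at index d
def posFrom (d : Int) (s : List Char) : List (Int × List Char) :=
  (PySem.List.enumerate s d).filterMap
    (fun ic => (pvHG.get? ic.2).map (fun reps => (ic.1, reps)))

theorem posFrom_nil (d : Int) : posFrom d [] = [] := rfl

theorem posFrom_cons (d : Int) (c : Char) (s : List Char) :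
    posFrom d (c :: s) =
      (match pvHG.get? c with
       | some reps => ((d, reps) : Int × List Char) :: posFrom (d + 1) s
       | none => posFrom (d + 1) s) := by
  simp only [posFrom, PySem.List.enumerate_cons, List.filterMap_cons]
  cases pvHG.get? c <;> simp

theorem map_flatMap_of_maps {α β γ δ : Type} (reps : List δ) (l1 : List α) (l2 : List β)
    (G : δ → α → List γ) (H : δ → β → List γ) (hlen : l1.length = l2.length)
    (h : ∀ rep, l1.map (G rep) = l2.map (H rep)) :
    l1.map (fun x => reps.flatMap (fun rep => G rep x))
      = l2.map (fun y => reps.flatMap (fun rep => H rep y)) := by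
  apply List.ext_getElem (by simpa using hlen)
  intro i h1 h2
  simp only [List.getElem_map]
  apply List.flatMap_congr
  intro rep _
  have := congrArg (fun l => l[i]?) (h rep)
  simp only [List.getElem?_map] at this
  have h1' : i < l1.length := by simpa using h1
  have h2' : i < l2.length := by simpa using h2
  rw [List.getElem?_eq_getElem h1', List.getElem?_eq_getElem h2'] at this
  simpa using this

-- THE CORE LEMMA: block-by-block, A's combinations×product×index-mutation over the
-- positions of the suffix s equals B's budgeted recursion over s.
theorem pv_main (s : List Char) (r : Nat) (pre : List Char) :
    (PySem.List.combinations (posFrom (pre.length : Int) s) r).map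
      (fun combo => (pvProduct (combo.map Prod.snd)).map
        (fun tup => ((combo.map Prod.fst).zip tup).foldl
          (fun chars p => chars.set p.1.toNat p.2) (pre ++ s)))
    = (pvGroups s r).map (List.map (pre ++ ·)) := by
  induction s generalizing r pre with
  | nil =>
    cases r with
    | zero => simp [posFrom_nil, PySem.List.combinations_zero, pvGroups, pvProduct]
    | succ r => simp [posFrom_nil, PySem.List.combinations_nil_succ, pvGroups]
  | cons c rest ih =>
    cases r with
    | zero => simp [PySem.List.combinations_zero, pvGroups, pvProduct]
    | succ r =>
      rw [posFrom_cons]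
      have hbase : pre ++ c :: rest = (pre ++ [c]) ++ rest := by simp
      have hlen1 : (((pre ++ [c]).length : Nat) : Int) = (pre.length : Int) + 1 := by
        simp
      -- the "keep c" part, shared by both branches of the match on pvHG.get? c
      have hkeep :
          (PySem.List.combinations (posFrom ((pre.length : Int) + 1) rest) (r + 1)).map
            (fun combo => (pvProduct (combo.map Prod.snd)).map
              (fun tup => ((combo.map Prod.fst).zip tup).foldl
                (fun chars p => chars.set p.1.toNat p.2) (pre ++ c :: rest)))
          = ((pvGroups rest (r + 1)).map (fun blk => blk.map (c :: ·))).map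
              (List.map (pre ++ ·)) := by
        have := ih (r + 1) (pre ++ [c])
        rw [hlen1] at this
        rw [hbase, this]
        simp [List.map_map, Function.comp_def]
      cases hc : pvHG.get? c with
      | none =>
        simpa [pvGroups, hc] using hkeep
      | some reps =>
        rw [PySem.List.combinations_cons_succ, List.map_append, List.map_map]
        have hsub :
            (PySem.List.combinations (posFrom ((pre.length : Int) + 1) rest) r).map
              ((fun combo => (pvProduct (combo.map Prod.snd)).map
                (fun tup => ((combo.map Prod.fst).zip tup).foldl
                  (fun chars p => chars.set p.1.toNat p.2) (pre ++ c :: rest)))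
                ∘ (((pre.length : Int), reps) :: ·))
            = ((pvGroups rest r).map
                (fun blk => reps.flatMap (fun rep => blk.map (rep :: ·)))).map
                (List.map (pre ++ ·)) := by
          have hset : ∀ rep : Char,
              (pre ++ c :: rest).set ((pre.length : Int)).toNat rep = (pre ++ [rep]) ++ rest := by
            intro rep
            rw [Int.toNat_natCast, List.set_append_right _ _ (le_refl _)]
            simp
          have hG : ∀ rep : Char,
              (PySem.List.combinations (posFrom ((pre.length : Int) + 1) rest) r).map
                (fun combo => (pvProduct (combo.map Prod.snd)).map
                  (fun tup => ((combo.map Prod.fst).zip tup).foldl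
                    (fun chars p => chars.set p.1.toNat p.2) ((pre ++ [rep]) ++ rest)))
              = (pvGroups rest r).map (fun blk => blk.map ((pre ++ [rep]) ++ ·)) := by
            intro rep
            have := ih r (pre ++ [rep])
            have hlenr : (((pre ++ [rep]).length : Nat) : Int) = (pre.length : Int) + 1 := by
              simp
            rw [hlenr] at this
            rw [this]
          have hlen : (PySem.List.combinations (posFrom ((pre.length : Int) + 1) rest) r).length
              = (pvGroups rest r).length := by
            have := congrArg List.length (hG c)
            simpa using this
          calc
            (PySem.List.combinations (posFrom ((pre.length : Int) + 1) rest) r).map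
              ((fun combo => (pvProduct (combo.map Prod.snd)).map
                (fun tup => ((combo.map Prod.fst).zip tup).foldl
                  (fun chars p => chars.set p.1.toNat p.2) (pre ++ c :: rest)))
                ∘ (((pre.length : Int), reps) :: ·))
              = (PySem.List.combinations (posFrom ((pre.length : Int) + 1) rest) r).map
                (fun combo => reps.flatMap (fun rep =>
                  (pvProduct (combo.map Prod.snd)).map
                    (fun tup => ((combo.map Prod.fst).zip tup).foldl
                      (fun chars p => chars.set p.1.toNat p.2) ((pre ++ [rep]) ++ rest)))) := by
                apply List.map_congr_left
                intro combo _
                simp only [Function.comp_apply, List.map_cons, pvProduct, List.map_flatMap,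
                  List.map_map]
                apply List.flatMap_congr
                intro rep _
                apply List.map_congr_left
                intro tup _
                simp only [Function.comp_apply, List.zip_cons_cons, List.foldl_cons]
                rw [hset rep]
            _ = (pvGroups rest r).map (fun blk => reps.flatMap (fun rep =>
                  blk.map ((pre ++ [rep]) ++ ·))) := by
                exact map_flatMap_of_maps reps _ _ _ _ hlen hG
            _ = ((pvGroups rest r).map
                  (fun blk => reps.flatMap (fun rep => blk.map (rep :: ·)))).map
                  (List.map (pre ++ ·)) := by
                rw [List.map_map]
                apply List.map_congr_left
                intro blk _
                simp only [Function.comp_apply, List.map_flatMap, List.map_map]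
                apply List.flatMap_congr
                intro rep _
                apply List.map_congr_left
                intro t _
                simp
        rw [hsub, hkeep]
        simp [pvGroups, hc]

-- flattened form, then lifted to strings
theorem pv_main_flat (s : List Char) (r : Nat) :
    (PySem.List.combinations (posFrom 0 s) r).flatMap
      (fun combo => (pvProduct (combo.map Prod.snd)).map
        (fun tup => String.ofList (((combo.map Prod.fst).zip tup).foldl
          (fun chars p => chars.set p.1.toNat p.2) s)))
    = ((pvGroups s r).flatten).map String.ofList := by
  have h := pv_main s r []
  simp only [List.nil_append, List.length_nil, Nat.cast_zero] at h
  calc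
    (PySem.List.combinations (posFrom 0 s) r).flatMap
      (fun combo => (pvProduct (combo.map Prod.snd)).map
        (fun tup => String.ofList (((combo.map Prod.fst).zip tup).foldl
          (fun chars p => chars.set p.1.toNat p.2) s)))
      = ((PySem.List.combinations (posFrom 0 s) r).map
          (fun combo => (pvProduct (combo.map Prod.snd)).map
            (fun tup => ((combo.map Prod.fst).zip tup).foldl
              (fun chars p => chars.set p.1.toNat p.2) s))).flatten.map String.ofList := by
        rw [List.map_flatten, List.map_map]
        simp [List.flatMap, Function.comp_def, List.map_map]
    _ = ((pvGroups s r).flatten).map String.ofList := by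
        rw [h]
        simp [List.map_flatten, List.map_map]

-- a nested loop that folds f over (g x).map (h x) for each x is one fold over the flat list
theorem foldl_add_flatMap {α β γ σ : Type} (f : σ → γ → σ) (g : α → List β)
    (h : α → β → γ) (l : List α) (v : σ) :
    l.foldl (fun acc x => (g x).foldl (fun a y => f a (h x y)) acc) v
      = (l.flatMap (fun x => (g x).map (h x))).foldl f v := by
  induction l generalizing v with
  | nil => rfl
  | cons x t ih =>
    rw [List.flatMap_cons, List.foldl_append, List.foldl_cons, ← List.foldl_map, ih]

-- the per-r loop body of A equals the per-r loop body of B, for every set state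
theorem pv_body (lbl : List Char) (r : Int) (v : PySem.Set String) :
    (PySem.List.combinations (posFrom 0 lbl) r.toNat).foldl (fun variants combo =>
        (pvProduct (combo.map Prod.snd)).foldl (fun variants product =>
            PySem.Set.add variants (String.ofList
              (((combo.map Prod.fst).zip product).foldl
                (fun chars p => chars.set p.1.toNat p.2) lbl)))
          variants) v
    = (pvGroups lbl r.toNat).foldl
        (fun variants blk => PySem.Set.update variants (blk.map String.ofList)) v := by
  have ha := foldl_add_flatMap PySem.Set.add
    (fun (combo : List (Int × List Char)) => pvProduct (combo.map Prod.snd))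
    (fun combo tup => String.ofList (((combo.map Prod.fst).zip tup).foldl
      (fun chars p => chars.set p.1.toNat p.2) lbl))
    (PySem.List.combinations (posFrom 0 lbl) r.toNat) v
  have hb := foldl_add_flatMap PySem.Set.add
    (fun (blk : List (List Char)) => blk) (fun _ t => String.ofList t)
    (pvGroups lbl r.toNat) v
  have hupd : ∀ (acc : PySem.Set String) (blk : List (List Char)),
      PySem.Set.update acc (blk.map String.ofList)
        = blk.foldl (fun a y => PySem.Set.add a (String.ofList y)) acc := by
    intro acc blk
    rw [show PySem.Set.update acc (blk.map String.ofList)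
        = (blk.map String.ofList).foldl PySem.Set.add acc from rfl, List.foldl_map]
  have hupd2 : (pvGroups lbl r.toNat).foldl
        (fun variants blk => PySem.Set.update variants (blk.map String.ofList)) v
      = (pvGroups lbl r.toNat).foldl
        (fun acc blk => blk.foldl (fun a y => PySem.Set.add a (String.ofList y)) acc) v :=
    PySem.List.foldl_congr_mem _ _ _ _ (fun acc blk _ => hupd acc blk)
  rw [hupd2, ha, hb, pv_main_flat]
  congr 1
  simp [List.flatMap]

-- B's recursion yields nothing once the budget exceeds the number of substitutable chars
theorem pvGroups_eq_nil (s : List Char) (r : Nat)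
    (h : s.countP (fun c => (pvHG.get? c).isSome) < r) : pvGroups s r = [] := by
  induction s generalizing r with
  | nil => cases r with
    | zero => simp at h
    | succ r => rfl
  | cons c rest ih =>
    cases r with
    | zero => simp at h
    | succ r =>
      rw [List.countP_cons] at h
      show (match pvHG.get? c with
        | some reps =>
            (pvGroups rest r).map (fun blk => reps.flatMap (fun rep => blk.map (rep :: ·)))
        | none => [])
        ++ (pvGroups rest (r + 1)).map (fun blk => blk.map (c :: ·)) = []
      cases hc : pvHG.get? c with
      | none =>
        have h' : rest.countP (fun c => (pvHG.get? c).isSome) < r + 1 := by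
          simp [hc] at h; omega
        simp only [hc]
        rw [ih (r + 1) h']
        simp
      | some reps =>
        have h' : rest.countP (fun c => (pvHG.get? c).isSome) < r := by
          simp [hc] at h; omega
        simp only [hc]
        rw [ih r h', ih (r + 1) (by omega)]
        simp

-- a fold whose body is the identity on every element of the list is the identity
theorem foldl_id_of_mem {α σ : Type} (l : List α) (f : σ → α → σ) (init : σ)
    (h : ∀ acc x, x ∈ l → f acc x = acc) : l.foldl f init = init := by
  induction l generalizing init with
  | nil => rfl
  | cons x t ih =>
    rw [List.foldl_cons, h init x (by simp)]
    exact ih init (fun acc y hy => h acc y (by simp [hy]))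

-- ===== VERDICT (by name: the statement is the Claim_ definition above) =====
theorem generate_variants_spec : Claim_equal_generate_variants := by
  intro label max_changes _
  unfold Spec_generate_variants generate_variants generate_variants_alt
  set lbl := label.toList with hlbl
  set k : Int := (lbl.countP (fun c => (pvHG.get? c).isSome) : Int) with hk
  have hk0 : 0 ≤ k := by positivity
  -- A's per-r body rewritten to B's, over A's range
  have h1 : (PySem.List.pyRange 1 (max_changes + 1) 1).foldl (fun variants r =>
      (PySem.List.combinations
        ((PySem.List.enumerate lbl 0).filterMap
          (fun ic => (pvHG.get? ic.2).map (fun reps => (ic.1, reps)))) r.toNat).foldl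
        (fun variants combo =>
          (pvProduct (combo.map Prod.snd)).foldl (fun variants product =>
              PySem.Set.add variants (String.ofList
                (((combo.map Prod.fst).zip product).foldl
                  (fun chars p => chars.set p.1.toNat p.2) lbl)))
            variants) variants) PySem.Set.empty
      = (PySem.List.pyRange 1 (max_changes + 1) 1).foldl (fun variants r =>
          (pvGroups lbl r.toNat).foldl
            (fun variants blk => PySem.Set.update variants (blk.map String.ofList)) variants)
          PySem.Set.empty := by
    apply PySem.List.foldl_congr_mem
    intro acc r _
    exact pv_body lbl r acc
  rw [h1]
  -- B uses range 1 .. min max_changes k + 1; the extra tail of A's range is inert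
  rcases le_or_gt max_changes k with hmk | hmk
  · rw [min_eq_left hmk]
  · rw [min_eq_right (le_of_lt hmk)]
    rw [PySem.List.pyRange_one_append 1 (k + 1) (max_changes + 1) (by omega) (by omega),
      List.foldl_append]
    apply foldl_id_of_mem
    intro acc r hr
    have hrk : k < r := by
      have := (PySem.List.mem_pyRange_one).1 hr
      omega
    rw [pvGroups_eq_nil lbl r.toNat (by omega)]
    rfl
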